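-- pv_equiv track=rewrite | github.com/gpblaney/rongorongo | viewer/glyph_sort.py | _group_and_sort_by_connections
-- ===== SOURCE A (Python) =====
-- from collections import deque
-- from typing import Any, Dict, List, Optional, Sequence, Tuple
--
-- def _find(parent: Dict[int, int], x: int) -> int:
--     if parent[x] != x:
--         parent[x] = _find(parent, parent[x])
--     return parent[x]
--
-- def _union(parent: Dict[int, int], rank: Dict[int, int], x: int, y: int) -> None:
--     root_x = _find(parent, x)
--     root_y = _find(parent, y)
--     if root_x == root_y:
--         return
--     if rank[root_x] < rank[root_y]:
--         parent[root_x] = root_y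
--     elif rank[root_x] > rank[root_y]:
--         parent[root_y] = root_x
--     else:
--         parent[root_y] = root_x
--         rank[root_x] += 1
--
-- def _cuthill_mckee_order(graph: Dict[int, List[int]], indices: List[int]) -> List[int]:
--     """BFS-like order; neighbors visited in increasing degree (within ``indices`` subgraph)."""
--     n = len(indices)
--     if n == 0:
--         return []
--     local_index = {idx: i for i, idx in enumerate(indices)}
--     subgraph = {i: [] for i in range(n)}
--     for i, gi in enumerate(indices):
--         for neighbor in graph.get(gi, []):
--             if neighbor in local_index:
--                 j = local_index[neighbor]
--                 if j not in subgraph[i]: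
--                     subgraph[i].append(j)
--                 if i not in subgraph[j]:
--                     subgraph[j].append(i)
--
--     visited = [False] * n
--     order: List[int] = []
--
--     def bfs(start: int) -> List[int]:
--         q: deque[int] = deque([start])
--         visited[start] = True
--         comp: List[int] = []
--         while q:
--             current = q.popleft()
--             comp.append(current)
--             for neighbor in sorted(subgraph[current], key=lambda x: len(subgraph[x])):
--                 if not visited[neighbor]:
--                     visited[neighbor] = True
--                     q.append(neighbor)
--         return comp
--
--     for i in range(n):
--         if not visited[i]:
--             mapped = bfs(i)
--             order.extend(indices[j] for j in mapped)
--     return order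
--
-- def _group_and_sort_by_connections(graph: Dict[int, List[int]], n: int) -> List[int]:
--     """Union–find on 0..n-1; multi-vertex components first (by size), CM order inside."""
--     if n == 0:
--         return []
--     parent = {i: i for i in range(n)}
--     rank = {i: 0 for i in range(n)}
--     for i in range(n):
--         for j in graph.get(i, []):
--             if 0 <= j < n:
--                 _union(parent, rank, i, j)
--
--     groups_dict: Dict[int, List[int]] = {}
--     for i in range(n):
--         root = _find(parent, i)
--         groups_dict.setdefault(root, []).append(i)
--     groups = list(groups_dict.values())
--
--     groups_mult = [g for g in groups if len(g) > 1]
--     groups_single = [g for g in groups if len(g) == 1]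
--
--     groups_mult.sort(key=lambda g: (-len(g), min(g)))
--
--     sorted_groups: List[List[int]] = []
--     for group in groups_mult:
--         sorted_groups.append(_cuthill_mckee_order(graph, group))
--     groups_single.sort(key=lambda g: g[0])
--     sorted_groups.extend(groups_single)
--
--     return [idx for group in sorted_groups for idx in group]
-- ===== SOURCE B (Python) =====
-- from collections import deque
-- from typing import Dict, List
--
--
-- def _cuthill_mckee_order(graph: Dict[int, List[int]], indices: List[int]) -> List[int]:
--     """BFS-like order; neighbors visited in increasing degree (within ``indices`` subgraph)."""
--     n = len(indices)
--     if n == 0: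
--         return []
--     local_index = {idx: i for i, idx in enumerate(indices)}
--     subgraph = {i: [] for i in range(n)}
--     for i, gi in enumerate(indices):
--         for neighbor in graph.get(gi, []):
--             if neighbor in local_index:
--                 j = local_index[neighbor]
--                 if j not in subgraph[i]:
--                     subgraph[i].append(j)
--                 if i not in subgraph[j]:
--                     subgraph[j].append(i)
--
--     visited = [False] * n
--     order: List[int] = []
--
--     def bfs(start: int) -> List[int]:
--         q: deque = deque([start])
--         visited[start] = True
--         comp: List[int] = []
--         while q:
--             current = q.popleft()
--             comp.append(current)
--             for neighbor in sorted(subgraph[current], key=lambda x: len(subgraph[x])):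
--                 if not visited[neighbor]:
--                     visited[neighbor] = True
--                     q.append(neighbor)
--         return comp
--
--     for i in range(n):
--         if not visited[i]:
--             mapped = bfs(i)
--             order.extend(indices[j] for j in mapped)
--     return order
--
--
-- def _group_and_sort_by_connections(graph: Dict[int, List[int]], n: int) -> List[int]:
--     """Label propagation on 0..n-1 (no union-find): each edge joining two classes relabels
--     the smaller class (members lists a stale class is never looked up again);
--     then the same sort + CM stages."""
--     label = list(range(n))
--     members = {i: [i] for i in range(n)}
--     for i in range(n):
--         for j in graph.get(i, []):
--             if 0 <= j < n and label[j] != label[i]: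
--                 new, old = label[i], label[j]
--                 if len(members[new]) < len(members[old]):
--                     new, old = old, new
--                 for x in members[old]:
--                     label[x] = new
--                 members[new].extend(members[old])
--     groups_dict: Dict[int, List[int]] = {}
--     for i in range(n):
--         groups_dict.setdefault(label[i], []).append(i)
--     groups = list(groups_dict.values())
--     mult = sorted((g for g in groups if len(g) > 1), key=lambda g: (-len(g), min(g)))
--     single = sorted((g for g in groups if len(g) == 1), key=lambda g: g[0])
--     return [x for g in mult for x in _cuthill_mckee_order(graph, g)] + [x for g in single for x in g]
-- ===== Notes on version B (the rewrite author's own statement) =====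
-- stated objective: alternative
-- what changed: Replaces the union-find machinery (parent/rank dicts, recursive path-compressing _find, union by rank) with a flat label-propagation partition: every node carries a component label, a members list is kept per label, and each in-range edge joining two differently-labelled nodes relabels the smaller class; the grouping, the (-len, min) / g[0] sorts and the Cuthill-McKee stage are unchanged.
import Mathlib
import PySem

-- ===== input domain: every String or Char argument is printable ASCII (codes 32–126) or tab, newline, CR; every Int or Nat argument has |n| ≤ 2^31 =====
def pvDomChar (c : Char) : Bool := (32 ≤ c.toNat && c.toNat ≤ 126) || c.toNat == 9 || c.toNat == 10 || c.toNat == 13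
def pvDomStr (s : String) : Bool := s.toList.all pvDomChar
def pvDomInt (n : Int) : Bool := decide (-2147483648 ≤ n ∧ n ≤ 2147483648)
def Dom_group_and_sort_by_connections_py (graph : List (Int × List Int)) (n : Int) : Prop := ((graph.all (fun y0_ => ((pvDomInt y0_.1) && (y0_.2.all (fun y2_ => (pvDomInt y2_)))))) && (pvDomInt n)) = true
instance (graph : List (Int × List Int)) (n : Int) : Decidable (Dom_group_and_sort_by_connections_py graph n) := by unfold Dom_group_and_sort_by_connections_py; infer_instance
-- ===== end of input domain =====

-- B replaces A's union–find (parent/rank dicts, path-compressing _find) by a plain label-propagation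
-- partition; the sort and Cuthill–McKee stages are unchanged. Objective: alternative (same result,
-- no fix claimed about speed).

-- ===== PORT A =====

-- _find(parent, x) with path compression.  Python's recursion has no fuel; the chain from x is
-- finite (acyclic forest), so fuel = n suffices at every call site (proved in the lemmas below);
-- the fuel-0 branch is unreachable there.  parent[x]: the key is always present at call sites,
-- so getD's default is never used.
def pvFindA (fuel : Nat) (parent : PySem.Dict Int Int) (x : Int) : PySem.Dict Int Int × Int :=
  match fuel with
  | 0 => (parent, x)
  | f + 1 =>
    let px := parent.getD x x
    if px = x then (parent, x)
    else
      let r := pvFindA f parent px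
      (r.1.insert x r.2, r.2)

-- _union(parent, rank, x, y); rank[root]: keys always present (roots are in range(n)).
def pvUnionA (fuel : Nat) (parent : PySem.Dict Int Int) (rank : PySem.Dict Int Int) (x y : Int) :
    PySem.Dict Int Int × PySem.Dict Int Int :=
  let f1 := pvFindA fuel parent x
  let f2 := pvFindA fuel f1.1 y
  let rootx := f1.2
  let rooty := f2.2
  if rootx = rooty then (f2.1, rank)
  else if rank.getD rootx 0 < rank.getD rooty 0 then (f2.1.insert rootx rooty, rank)
  else if rank.getD rooty 0 < rank.getD rootx 0 then (f2.1.insert rooty rootx, rank)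
  else (f2.1.insert rooty rootx, rank.insert rootx (rank.getD rootx 0 + 1))

-- the while-loop of bfs inside _cuthill_mckee_order.  Each iteration pops one queue element and
-- every enqueue flips one visited flag False→True, so fuel = len(indices) suffices (the deque
-- holds local indices 0..n0-1; visited[k]: always in range, default never used).
def pvCmBfs (sub : PySem.Dict Int (List Int)) : Nat → List Int → List Bool → List Int →
    List Int × List Bool
  | 0, _, visited, comp => (comp, visited)
  | _ + 1, [], visited, comp => (comp, visited)
  | f + 1, cur :: rest, visited, comp =>
    let nbrs := PySem.List.sorted (sub.getD cur []) (fun x => PySem.List.len (sub.getD x [])) false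
    let st := nbrs.foldl
      (fun (st : List Int × List Bool) nb =>
        if PySem.List.pyGetD st.2 nb true = false then (st.1 ++ [nb], PySem.List.pySetD st.2 nb true)
        else st)
      (rest, visited)
    pvCmBfs sub f st.1 st.2 (comp ++ [cur])

-- _cuthill_mckee_order(graph, indices).  'subgraph[i].append(j)' keeps the key's position:
-- Dict.modify; 'setdefault' never occurs here (keys 0..n0-1 pre-inserted).
def pvCmOrder (graph : List (Int × List Int)) (indices : List Int) : List Int :=
  let n0 := indices.length
  if n0 = 0 then []
  else
    let localIndex : PySem.Dict Int Int :=
      (PySem.List.enumerate indices 0).foldl (fun d p => d.insert p.2 p.1) PySem.Dict.empty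
    let subgraph0 : PySem.Dict Int (List Int) :=
      (PySem.List.pyRange 0 (n0 : Int) 1).foldl (fun d i => d.insert i []) PySem.Dict.empty
    let subgraph :=
      (PySem.List.enumerate indices 0).foldl
        (fun sg p =>
          ((PySem.Dict.mk graph).getD p.2 []).foldl
            (fun (sg : PySem.Dict Int (List Int)) nb =>
              match localIndex.get? nb with
              | none => sg
              | some j =>
                let sg := if j ∈ sg.getD p.1 [] then sg else sg.modify p.1 [] (· ++ [j])
                if p.1 ∈ sg.getD j [] then sg else sg.modify j [] (· ++ [p.1]))
            sg)
        subgraph0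
    let st :=
      (PySem.List.pyRange 0 (n0 : Int) 1).foldl
        (fun (st : List Bool × List Int) i =>
          if PySem.List.pyGetD st.1 i true = false then
            let r := pvCmBfs subgraph n0 [i] (PySem.List.pySetD st.1 i true) []
            (r.2, st.2 ++ r.1.map (fun j => PySem.List.pyGetD indices j 0))
          else st)
        (List.replicate n0 false, [])
    st.2

-- _group_and_sort_by_connections(graph, n), step for step.
-- 'groups_dict.setdefault(root, []).append(i)' is exactly Dict.modify root [] (· ++ [i]).
def group_and_sort_by_connections_py (graph : List (Int × List Int)) (n : Int) : List Int :=
  if n = 0 then []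
  else
    let parent0 := (PySem.List.pyRange 0 n 1).foldl (fun d i => d.insert i i) PySem.Dict.empty
    let rank0 := (PySem.List.pyRange 0 n 1).foldl (fun d i => d.insert i 0) PySem.Dict.empty
    let pr :=
      (PySem.List.pyRange 0 n 1).foldl
        (fun (pr : PySem.Dict Int Int × PySem.Dict Int Int) i =>
          ((PySem.Dict.mk graph).getD i []).foldl
            (fun pr j => if 0 ≤ j ∧ j < n then pvUnionA n.toNat pr.1 pr.2 i j else pr) pr)
        (parent0, rank0)
    let st :=
      (PySem.List.pyRange 0 n 1).foldl
        (fun (st : PySem.Dict Int Int × PySem.Dict Int (List Int)) i =>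
          let f := pvFindA n.toNat st.1 i
          (f.1, st.2.modify f.2 [] (· ++ [i])))
        (pr.1, PySem.Dict.empty)
    let groups := st.2.values
    let groupsMult := groups.filter (fun g => 1 < g.length)
    let groupsSingle := groups.filter (fun g => g.length = 1)
    let multSorted := PySem.List.sorted2 groupsMult (fun g => -(PySem.List.len g))
      (fun g => ((PySem.List.min? g (fun x => x)).getD 0)) false
    let sortedGroups := multSorted.foldl (fun acc g => acc ++ [pvCmOrder graph g]) []
    let singleSorted := PySem.List.sorted groupsSingle (fun g => PySem.List.pyGetD g 0 0) false
    (sortedGroups ++ singleSorted).flatMap (fun g => g)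

-- ===== PORT B =====

-- one iteration of B's inner edge loop: guard, pick 'new'/'old' (smaller class is relabelled),
-- relabel members[old] one by one, extend members[new].  label[i]/label[j]/label[x]: indices are
-- always in range(n); members[new]/members[old]: live labels are always keys (defaults unused).
def pvRelabel (n : Int) (st : List Int × PySem.Dict Int (List Int)) (i j : Int) :
    List Int × PySem.Dict Int (List Int) :=
  if (0 ≤ j ∧ j < n) ∧ PySem.List.pyGetD st.1 j 0 ≠ PySem.List.pyGetD st.1 i 0 then
    let nw0 := PySem.List.pyGetD st.1 i 0
    let od0 := PySem.List.pyGetD st.1 j 0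
    let swap := PySem.List.len (st.2.getD nw0 []) < PySem.List.len (st.2.getD od0 [])
    let nw := if swap then od0 else nw0
    let od := if swap then nw0 else od0
    ((st.2.getD od []).foldl (fun lab x => PySem.List.pySetD lab x nw) st.1,
     st.2.modify nw [] (· ++ st.2.getD od []))
  else st

def group_and_sort_by_connections_py_alt (graph : List (Int × List Int)) (n : Int) : List Int :=
  let label0 := PySem.List.pyRange 0 n 1
  let members0 := (PySem.List.pyRange 0 n 1).foldl
    (fun (d : PySem.Dict Int (List Int)) i => d.insert i [i]) PySem.Dict.empty
  let st :=
    (PySem.List.pyRange 0 n 1).foldl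
      (fun st i =>
        ((PySem.Dict.mk graph).getD i []).foldl (fun st j => pvRelabel n st i j) st)
      (label0, members0)
  let label := st.1
  let gd :=
    (PySem.List.pyRange 0 n 1).foldl
      (fun (d : PySem.Dict Int (List Int)) i =>
        d.modify (PySem.List.pyGetD label i 0) [] (· ++ [i]))
      PySem.Dict.empty
  let groups := gd.values
  let mult := PySem.List.sorted2 (groups.filter (fun g => 1 < g.length))
    (fun g => -(PySem.List.len g)) (fun g => ((PySem.List.min? g (fun x => x)).getD 0)) false
  let single := PySem.List.sorted (groups.filter (fun g => g.length = 1))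
    (fun g => PySem.List.pyGetD g 0 0) false
  (mult.map (fun g => pvCmOrder graph g)).flatten ++ single.flatten

-- ===== PRECONDITION & SPEC =====
def Spec_group_and_sort_by_connections_py (graph : List (Int × List Int)) (n : Int) (out : List Int) : Prop := out = group_and_sort_by_connections_py_alt graph n
instance (graph : List (Int × List Int)) (n : Int) (out : List Int) : Decidable (Spec_group_and_sort_by_connections_py graph n out) := by unfold Spec_group_and_sort_by_connections_py; infer_instance

-- ===== CLAIM (what is proved, stated in full; the proofs are below) =====
def Claim_equal_group_and_sort_by_connections_py : Prop := ∀ (graph : List (Int × List Int)) (n : Int), Dom_group_and_sort_by_connections_py graph n → Spec_group_and_sort_by_connections_py graph n (group_and_sort_by_connections_py graph n)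

-- ===== LEMMAS AND PROOFS =====


-- ---------- abstract parent-chasing theory ----------

def pvPF (p : PySem.Dict Int Int) : Int → Int := fun x => p.getD x x

def pvIter (f : Int → Int) : Nat → Int → Int
  | 0, x => x
  | k + 1, x => pvIter f k (f x)

def pvRootN (f : Int → Int) : Nat → Int → Int
  | 0, x => x
  | k + 1, x => if f x = x then x else pvRootN f k (f x)

def pvGood (n : Int) (f : Int → Int) : Prop :=
  ∀ x, 0 ≤ x → x < n → (0 ≤ f x ∧ f x < n) ∧ ∃ k, f (pvIter f k x) = pvIter f k x

def pvR (n : Int) (f : Int → Int) (x : Int) : Int := pvRootN f n.toNat x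

lemma pvIter_add (f : Int → Int) (a b : Nat) (x : Int) :
    pvIter f (a + b) x = pvIter f b (pvIter f a x) := by
  induction a generalizing x with
  | zero => simp [pvIter]
  | succ a ih =>
      have h : a + 1 + b = (a + b) + 1 := by omega
      rw [h]
      show pvIter f (a + b) (f x) = pvIter f b (pvIter f a (f x))
      exact ih (f x)

lemma pvIter_fix (f : Int → Int) {r : Int} (h : f r = r) : ∀ m, pvIter f m r = r := by
  intro m
  induction m with
  | zero => rfl
  | succ m ih => show pvIter f m (f r) = r; rw [h]; exact ih

lemma pvReach_unique (f : Int → Int) {x r s : Int} {a b : Nat}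
    (hr : f r = r) (hs : f s = s) (ha : pvIter f a x = r) (hb : pvIter f b x = s) : r = s := by
  rcases le_total a b with h | h
  · have hb' : b = a + (b - a) := by omega
    rw [hb', pvIter_add, ha, pvIter_fix f hr] at hb
    exact hb
  · have ha' : a = b + (a - b) := by omega
    rw [ha', pvIter_add, hb, pvIter_fix f hs] at ha
    exact ha.symm

lemma pvIter_mem_range {n : Int} {f : Int → Int} (hg : pvGood n f) :
    ∀ (m : Nat) (x : Int), 0 ≤ x → x < n → 0 ≤ pvIter f m x ∧ pvIter f m x < n := by
  intro m
  induction m with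
  | zero => intro x h1 h2; exact ⟨h1, h2⟩
  | succ m ih =>
      intro x h1 h2
      have hf := (hg x h1 h2).1
      exact ih (f x) hf.1 hf.2

lemma pvRootN_reach (f : Int → Int) :
    ∀ (fuel k : Nat) (x : Int), f (pvIter f k x) = pvIter f k x → k ≤ fuel →
      (∃ m, pvRootN f fuel x = pvIter f m x) ∧ f (pvRootN f fuel x) = pvRootN f fuel x := by
  intro fuel
  induction fuel with
  | zero =>
      intro k x hx hk
      have hk0 : k = 0 := by omega
      subst hk0
      exact ⟨⟨0, rfl⟩, hx⟩
  | succ fuel ih =>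
      intro k x hx hk
      by_cases hfx : f x = x
      · exact ⟨⟨0, by simp [pvRootN, hfx, pvIter]⟩, by simp [pvRootN, hfx]⟩
      · have hk0 : k ≠ 0 := by
          intro h; subst h; exact hfx hx
        obtain ⟨k', rfl⟩ : ∃ k', k = k' + 1 := ⟨k - 1, by omega⟩
        have hx' : f (pvIter f k' (f x)) = pvIter f k' (f x) := hx
        obtain ⟨⟨m, hm⟩, hfix⟩ := ih k' (f x) hx' (by omega)
        have hroot : pvRootN f (fuel + 1) x = pvRootN f fuel (f x) := by simp [pvRootN, hfx]
        refine ⟨⟨m + 1, ?_⟩, ?_⟩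
        · rw [hroot, hm]; rfl
        · rw [hroot]; exact hfix

lemma pvFix_lt_n {n : Int} {f : Int → Int} (hg : pvGood n f) {x : Int}
    (hx : 0 ≤ x) (hx2 : x < n) :
    ∃ k, k < n.toNat ∧ f (pvIter f k x) = pvIter f k x := by
  obtain ⟨k0, hk0⟩ := (hg x hx hx2).2
  have hex : ∃ k, f (pvIter f k x) = pvIter f k x := ⟨k0, hk0⟩
  classical
  set k := Nat.find hex with hkdef
  have hkfix : f (pvIter f k x) = pvIter f k x := Nat.find_spec hex
  have hkmin : ∀ m, m < k → ¬ f (pvIter f m x) = pvIter f m x := fun m hm => Nat.find_min hex hm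
  refine ⟨k, ?_, hkfix⟩
  -- the k+1 chain points are pairwise distinct and all lie in [0, n)
  have hinj : ∀ t1 ∈ List.range (k + 1), ∀ t2 ∈ List.range (k + 1),
      pvIter f t1 x = pvIter f t2 x → t1 = t2 := by
    intro t1 ht1 t2 ht2 heq
    simp only [List.mem_range] at ht1 ht2
    by_contra hne
    have main : ∀ s1 s2 : Nat, s1 < s2 → s2 < k + 1 → pvIter f s1 x = pvIter f s2 x → False := by
      intro s1 s2 hlt hs2 hseq
      have hchain : pvIter f k x = pvIter f (s1 + (k - s2)) x := by
        calc pvIter f k x = pvIter f (s2 + (k - s2)) x := by congr 1; omega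
          _ = pvIter f (k - s2) (pvIter f s2 x) := pvIter_add f s2 (k - s2) x
          _ = pvIter f (k - s2) (pvIter f s1 x) := by rw [hseq]
          _ = pvIter f (s1 + (k - s2)) x := (pvIter_add f s1 (k - s2) x).symm
      have hfix' : f (pvIter f (s1 + (k - s2)) x) = pvIter f (s1 + (k - s2)) x := by
        rw [← hchain]; exact hkfix
      exact hkmin (s1 + (k - s2)) (by omega) hfix'
    rcases Nat.lt_or_ge t1 t2 with hlt | hge
    · exact main t1 t2 hlt ht2 heq
    · exact main t2 t1 (by omega) ht1 heq.symm
  have hnodup : ((List.range (k + 1)).map (fun t => pvIter f t x)).Nodup :=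
    List.Nodup.map_on (fun t1 h1 t2 h2 h => hinj t1 h1 t2 h2 h) (List.nodup_range)
  have hsub : ((List.range (k + 1)).map (fun t => pvIter f t x)).toFinset ⊆ Finset.Ico (0 : Int) n := by
    intro z hz
    simp only [List.mem_toFinset, List.mem_map, List.mem_range] at hz
    obtain ⟨t, _, rfl⟩ := hz
    have := pvIter_mem_range hg t x hx hx2
    simp only [Finset.mem_Ico]
    exact this
  have hcard : ((List.range (k + 1)).map (fun t => pvIter f t x)).toFinset.card = k + 1 := by
    rw [List.toFinset_card_of_nodup hnodup]
    simp
  have hle := Finset.card_le_card hsub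
  rw [hcard, Int.card_Ico] at hle
  omega

lemma pvR_spec {n : Int} {f : Int → Int} (hg : pvGood n f) {x : Int}
    (hx : 0 ≤ x) (hx2 : x < n) :
    (∃ m, pvR n f x = pvIter f m x) ∧ f (pvR n f x) = pvR n f x := by
  obtain ⟨k, hk, hfix⟩ := pvFix_lt_n hg hx hx2
  exact pvRootN_reach f n.toNat k x hfix (by omega)

lemma pvR_fix {n : Int} {f : Int → Int} (hg : pvGood n f) {x : Int}
    (hx : 0 ≤ x) (hx2 : x < n) : f (pvR n f x) = pvR n f x :=
  (pvR_spec hg hx hx2).2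

lemma pvR_eq_of_reach {n : Int} {f : Int → Int} (hg : pvGood n f) {x r : Int} {a : Nat}
    (hx : 0 ≤ x) (hx2 : x < n) (hr : f r = r) (ha : pvIter f a x = r) : pvR n f x = r := by
  obtain ⟨⟨m, hm⟩, hfix⟩ := pvR_spec hg hx hx2
  exact pvReach_unique f hfix hr hm.symm ha

lemma pvR_of_fix {n : Int} {f : Int → Int} (hg : pvGood n f) {x : Int}
    (hx : 0 ≤ x) (hx2 : x < n) (h : f x = x) : pvR n f x = x :=
  pvR_eq_of_reach hg hx hx2 h (a := 0) rfl

lemma pvR_mem_range {n : Int} {f : Int → Int} (hg : pvGood n f) {x : Int}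
    (hx : 0 ≤ x) (hx2 : x < n) : 0 ≤ pvR n f x ∧ pvR n f x < n := by
  obtain ⟨⟨m, hm⟩, _⟩ := pvR_spec hg hx hx2
  rw [hm]
  exact pvIter_mem_range hg m x hx hx2

lemma pvR_step {n : Int} {f : Int → Int} (hg : pvGood n f) {x : Int}
    (hx : 0 ≤ x) (hx2 : x < n) : pvR n f (f x) = pvR n f x := by
  by_cases hfx : f x = x
  · rw [hfx]
  · have hfr := (hg x hx hx2).1
    obtain ⟨⟨m, hm⟩, hfix⟩ := pvR_spec hg hx hx2
    have hm0 : m ≠ 0 := by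
      intro h
      subst h
      have hx0 : pvR n f x = x := by simpa [pvIter] using hm
      rw [hx0] at hfix
      exact hfx hfix
    obtain ⟨m', rfl⟩ : ∃ m', m = m' + 1 := ⟨m - 1, by omega⟩
    have hreach : pvIter f m' (f x) = pvR n f x := hm.symm
    exact pvR_eq_of_reach hg hfr.1 hfr.2 hfix hreach


-- ---------- effect of the two kinds of parent updates ----------

lemma pvCompress {n : Int} {f : Int → Int} (hg : pvGood n f) {c : Int}
    (hc : 0 ≤ c) (hc2 : c < n) :
    pvGood n (fun z => if z = c then pvR n f c else f z) ∧
    ∀ z, 0 ≤ z → z < n →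
      pvR n (fun z => if z = c then pvR n f c else f z) z = pvR n f z := by
  set f' := fun z => if z = c then pvR n f c else f z with hf'
  have hrt : ∀ x, 0 ≤ x → x < n → f' (pvR n f x) = pvR n f x := by
    intro x hx hx2
    by_cases h : pvR n f x = c
    · have hcfix : f c = c := by rw [← h]; exact pvR_fix hg hx hx2
      have : pvR n f c = c := pvR_of_fix hg hc hc2 hcfix
      simp [hf', h, this]
    · simp [hf', h]
      exact pvR_fix hg hx hx2
  have hreach : ∀ k x, 0 ≤ x → x < n → f (pvIter f k x) = pvIter f k x →
      ∃ m, pvIter f' m x = pvR n f x := by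
    intro k
    induction k using Nat.strong_induction_on with
    | _ k ih =>
      intro x hx hx2 hfix
      by_cases hfx : f x = x
      · exact ⟨0, by simpa [pvIter] using (pvR_of_fix hg hx hx2 hfx).symm⟩
      · by_cases hxc : x = c
        · refine ⟨1, ?_⟩
          show pvIter f' 0 (f' x) = pvR n f x
          simp only [pvIter]
          simp [hf', hxc]
        · have hk0 : k ≠ 0 := by
            intro h; subst h; exact hfx hfix
          obtain ⟨k', rfl⟩ : ∃ k', k = k' + 1 := ⟨k - 1, by omega⟩
          have hfr := (hg x hx hx2).1
          obtain ⟨m, hm⟩ := ih k' (by omega) (f x) hfr.1 hfr.2 hfix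
          refine ⟨m + 1, ?_⟩
          show pvIter f' m (f' x) = pvR n f x
          have : f' x = f x := by simp [hf', hxc]
          rw [this, hm, pvR_step hg hx hx2]
  have hgood : pvGood n f' := by
    intro x hx hx2
    constructor
    · by_cases hxc : x = c
      · simpa [hf', hxc] using pvR_mem_range hg hc hc2
      · simpa [hf', hxc] using (hg x hx hx2).1
    · obtain ⟨k, hk⟩ := (hg x hx hx2).2
      obtain ⟨m, hm⟩ := hreach k x hx hx2 hk
      exact ⟨m, by rw [hm]; exact hrt x hx hx2⟩
  refine ⟨hgood, ?_⟩
  intro z hz hz2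
  obtain ⟨k, hk⟩ := (hg z hz hz2).2
  obtain ⟨m, hm⟩ := hreach k z hz hz2 hk
  exact pvR_eq_of_reach hgood hz hz2 (hrt z hz hz2) hm

lemma pvLink {n : Int} {f : Int → Int} (hg : pvGood n f) {a b : Int}
    (ha : 0 ≤ a) (ha2 : a < n) (hb : 0 ≤ b) (hb2 : b < n)
    (hfa : f a = a) (hfb : f b = b) (hab : a ≠ b) :
    pvGood n (fun z => if z = a then b else f z) ∧
    ∀ z, 0 ≤ z → z < n →
      pvR n (fun z => if z = a then b else f z) z =
        if pvR n f z = a then b else pvR n f z := by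
  set f' := fun z => if z = a then b else f z with hf'
  have htfix : ∀ z, 0 ≤ z → z < n →
      f' (if pvR n f z = a then b else pvR n f z) = (if pvR n f z = a then b else pvR n f z) := by
    intro z hz hz2
    by_cases h : pvR n f z = a
    · simp [h, hf', (Ne.symm hab), hfb]
    · simp only [if_neg h]
      simp [hf', h, pvR_fix hg hz hz2]
  have hreach : ∀ k x, 0 ≤ x → x < n → f (pvIter f k x) = pvIter f k x →
      ∃ m, pvIter f' m x = (if pvR n f x = a then b else pvR n f x) := by
    intro k
    induction k using Nat.strong_induction_on with
    | _ k ih =>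
      intro x hx hx2 hfix
      by_cases hfx : f x = x
      · have hrx : pvR n f x = x := pvR_of_fix hg hx hx2 hfx
        by_cases hxa : x = a
        · subst hxa
          refine ⟨1, ?_⟩
          show pvIter f' 0 (f' x) = _
          simp [pvIter, hf', hrx]
        · exact ⟨0, by simp [pvIter, hrx, hxa]⟩
      · have hxa : x ≠ a := by intro h; subst h; exact hfx hfa
        have hk0 : k ≠ 0 := by intro h; subst h; exact hfx hfix
        obtain ⟨k', rfl⟩ : ∃ k', k = k' + 1 := ⟨k - 1, by omega⟩
        have hfr := (hg x hx hx2).1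
        obtain ⟨m, hm⟩ := ih k' (by omega) (f x) hfr.1 hfr.2 hfix
        refine ⟨m + 1, ?_⟩
        show pvIter f' m (f' x) = _
        have hstep : f' x = f x := by simp [hf', hxa]
        rw [hstep, hm, pvR_step hg hx hx2]
  have hgood : pvGood n f' := by
    intro x hx hx2
    constructor
    · by_cases hxa : x = a
      · simpa [hf', hxa] using ⟨hb, hb2⟩
      · simpa [hf', hxa] using (hg x hx hx2).1
    · obtain ⟨k, hk⟩ := (hg x hx hx2).2
      obtain ⟨m, hm⟩ := hreach k x hx hx2 hk
      exact ⟨m, by rw [hm]; exact htfix x hx hx2⟩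
  refine ⟨hgood, ?_⟩
  intro z hz hz2
  obtain ⟨k, hk⟩ := (hg z hz hz2).2
  obtain ⟨m, hm⟩ := hreach k z hz hz2 hk
  exact pvR_eq_of_reach hgood hz hz2 (htfix z hz hz2) hm

-- ---------- specifications of the ported _find and _union ----------

lemma pvPF_insert (d : PySem.Dict Int Int) (a b : Int) :
    pvPF (d.insert a b) = fun z => if z = a then b else pvPF d z := by
  funext z
  simp [pvPF, PySem.Dict.getD_insert]

lemma pvFind_spec {n : Int} :
    ∀ (fuel : Nat) (p : PySem.Dict Int Int) (x : Int) (k : Nat),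
      pvGood n (pvPF p) → 0 ≤ x → x < n →
      pvPF p (pvIter (pvPF p) k x) = pvIter (pvPF p) k x → k < fuel →
      (pvFindA fuel p x).2 = pvR n (pvPF p) x ∧
      pvGood n (pvPF (pvFindA fuel p x).1) ∧
      ∀ z, 0 ≤ z → z < n → pvR n (pvPF (pvFindA fuel p x).1) z = pvR n (pvPF p) z := by
  intro fuel
  induction fuel with
  | zero => intro p x k _ _ _ _ hk; omega
  | succ fuel ih =>
      intro p x k hg hx hx2 hfix hk
      by_cases hpx : p.getD x x = x
      · have hres : pvFindA (fuel + 1) p x = (p, x) := by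
          simp [pvFindA, hpx]
        rw [hres]
        refine ⟨(pvR_of_fix hg hx hx2 hpx).symm, hg, fun z _ _ => rfl⟩
      · have hfx : pvPF p x ≠ x := hpx
        have hk0 : k ≠ 0 := by
          intro h; subst h; exact hfx hfix
        obtain ⟨k', rfl⟩ : ∃ k', k = k' + 1 := ⟨k - 1, by omega⟩
        have hfr := (hg x hx hx2).1
        have hfix' : pvPF p (pvIter (pvPF p) k' (pvPF p x)) = pvIter (pvPF p) k' (pvPF p x) := hfix
        obtain ⟨hr2, hgood', hpres⟩ := ih p (pvPF p x) k' hg hfr.1 hfr.2 hfix' (by omega)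
        have hres : pvFindA (fuel + 1) p x =
            ((pvFindA fuel p (p.getD x x)).1.insert x (pvFindA fuel p (p.getD x x)).2,
             (pvFindA fuel p (p.getD x x)).2) := by
          simp [pvFindA, hpx]
        rw [hres]
        have hpfx : p.getD x x = pvPF p x := rfl
        set r := pvFindA fuel p (p.getD x x) with hrdef
        rw [hpfx] at hrdef
        have hr2' : r.2 = pvR n (pvPF p) x := by
          rw [hrdef, hr2, pvR_step hg hx hx2]
        have hr2'' : r.2 = pvR n (pvPF r.1) x := by
          rw [hr2', ← hpres x hx hx2, hrdef]
        have hins : pvPF (r.1.insert x r.2) =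
            fun z => if z = x then pvR n (pvPF r.1) x else pvPF r.1 z := by
          rw [pvPF_insert, hr2'']
        have hgood'' : pvGood n (pvPF r.1) := by rw [hrdef]; exact hgood'
        obtain ⟨hgc, hrc⟩ := pvCompress hgood'' (c := x) hx hx2
        refine ⟨?_, ?_, ?_⟩
        · exact hr2'
        · show pvGood n (pvPF (r.1.insert x r.2))
          rw [hins]; exact hgc
        · intro z hz hz2
          show pvR n (pvPF (r.1.insert x r.2)) z = pvR n (pvPF p) z
          rw [hins, hrc z hz hz2, hrdef]
          exact hpres z hz hz2

lemma pvUnion_spec {n : Int} (p rank : PySem.Dict Int Int) {x y : Int}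
    (hg : pvGood n (pvPF p)) (hx : 0 ≤ x) (hx2 : x < n) (hy : 0 ≤ y) (hy2 : y < n) :
    pvGood n (pvPF (pvUnionA n.toNat p rank x y).1) ∧
    ∃ w, (w = pvR n (pvPF p) x ∨ w = pvR n (pvPF p) y) ∧
      ∀ z, 0 ≤ z → z < n →
        pvR n (pvPF (pvUnionA n.toNat p rank x y).1) z =
          if pvR n (pvPF p) z = pvR n (pvPF p) x ∨ pvR n (pvPF p) z = pvR n (pvPF p) y
          then w else pvR n (pvPF p) z := by
  obtain ⟨k1, hk1, hfix1⟩ := pvFix_lt_n hg hx hx2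
  obtain ⟨h12, hgood1, hpres1⟩ := pvFind_spec n.toNat p x k1 hg hx hx2 hfix1 hk1
  set f1 := pvFindA n.toNat p x with hf1def
  obtain ⟨k2, hk2, hfix2⟩ := pvFix_lt_n hgood1 hy hy2
  obtain ⟨h22, hgood2, hpres2⟩ := pvFind_spec n.toNat f1.1 y k2 hgood1 hy hy2 hfix2 hk2
  set f2 := pvFindA n.toNat f1.1 y with hf2def
  have h22' : f2.2 = pvR n (pvPF p) y := by rw [h22]; exact hpres1 y hy hy2
  have hpresz : ∀ z, 0 ≤ z → z < n → pvR n (pvPF f2.1) z = pvR n (pvPF p) z := by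
    intro z hz hz2; rw [hpres2 z hz hz2]; exact hpres1 z hz hz2
  set Rx := pvR n (pvPF p) x with hRx
  set Ry := pvR n (pvPF p) y with hRy
  have hRxmem := pvR_mem_range hg hx hx2
  have hRymem := pvR_mem_range hg hy hy2
  by_cases heq : f1.2 = f2.2
  · have hres : pvUnionA n.toNat p rank x y = (f2.1, rank) := by
      simp only [pvUnionA, ← hf1def, ← hf2def, if_pos heq]
    rw [hres]
    refine ⟨hgood2, Rx, Or.inl rfl, ?_⟩
    intro z hz hz2
    have hxy : Rx = Ry := by rw [← h12, ← h22']; exact heq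
    rw [hpresz z hz hz2]
    by_cases hc : pvR n (pvPF p) z = Rx ∨ pvR n (pvPF p) z = Ry
    · rw [if_pos hc]
      rcases hc with hc | hc
      · exact hc
      · rw [hc, hxy]
    · rw [if_neg hc]
  · have main : ∀ a b : Int, (a = Rx ∧ b = Ry) ∨ (a = Ry ∧ b = Rx) →
        pvGood n (pvPF (f2.1.insert a b)) ∧
        ∀ z, 0 ≤ z → z < n →
          pvR n (pvPF (f2.1.insert a b)) z =
            if pvR n (pvPF p) z = Rx ∨ pvR n (pvPF p) z = Ry then b else pvR n (pvPF p) z := by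
      intro a b hcase
      have hane : Rx ≠ Ry := by
        intro h; apply heq; rw [h12, h22']; exact h
      have hamem : 0 ≤ a ∧ a < n := by rcases hcase with ⟨rfl, _⟩ | ⟨rfl, _⟩ <;> [exact hRxmem; exact hRymem]
      have hbmem : 0 ≤ b ∧ b < n := by rcases hcase with ⟨_, rfl⟩ | ⟨_, rfl⟩ <;> [exact hRymem; exact hRxmem]
      have hab : a ≠ b := by rcases hcase with ⟨rfl, rfl⟩ | ⟨rfl, rfl⟩ <;> [exact hane; exact hane.symm]
      have hafix : pvPF f2.1 a = a := by
        rcases hcase with ⟨rfl, _⟩ | ⟨rfl, _⟩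
        · have : pvR n (pvPF f2.1) x = Rx := by rw [hpresz x hx hx2]
          rw [← this]; exact pvR_fix hgood2 hx hx2
        · have : pvR n (pvPF f2.1) y = Ry := by rw [hpresz y hy hy2]
          rw [← this]; exact pvR_fix hgood2 hy hy2
      have hbfix : pvPF f2.1 b = b := by
        rcases hcase with ⟨_, rfl⟩ | ⟨_, rfl⟩
        · have : pvR n (pvPF f2.1) y = Ry := by rw [hpresz y hy hy2]
          rw [← this]; exact pvR_fix hgood2 hy hy2
        · have : pvR n (pvPF f2.1) x = Rx := by rw [hpresz x hx hx2]
          rw [← this]; exact pvR_fix hgood2 hx hx2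
      obtain ⟨hgl, hrl⟩ := pvLink hgood2 hamem.1 hamem.2 hbmem.1 hbmem.2 hafix hbfix hab
      have hins : pvPF (f2.1.insert a b) = fun z => if z = a then b else pvPF f2.1 z :=
        pvPF_insert f2.1 a b
      constructor
      · rw [hins]; exact hgl
      · intro z hz hz2
        rw [hins, hrl z hz hz2, hpresz z hz hz2]
        by_cases hza : pvR n (pvPF p) z = a
        · rw [if_pos hza, if_pos]
          rcases hcase with ⟨rfl, _⟩ | ⟨rfl, _⟩
          · exact Or.inl hza
          · exact Or.inr hza
        · rw [if_neg hza]
          by_cases hzc : pvR n (pvPF p) z = Rx ∨ pvR n (pvPF p) z = Ry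
          · rw [if_pos hzc]
            rcases hcase with ⟨ha', hb'⟩ | ⟨ha', hb'⟩
            · rcases hzc with h | h
              · exact absurd (h.trans ha'.symm) hza
              · rw [h, hb']
            · rcases hzc with h | h
              · rw [h, hb']
              · exact absurd (h.trans ha'.symm) hza
          · rw [if_neg hzc]
    have h12' : f1.2 = Rx := h12
    have h22'' : f2.2 = Ry := h22'
    by_cases hr1 : rank.getD f1.2 0 < rank.getD f2.2 0
    · have hres : pvUnionA n.toNat p rank x y = (f2.1.insert f1.2 f2.2, rank) := by
        simp only [pvUnionA, ← hf1def, ← hf2def, if_neg heq, if_pos hr1]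
      rw [hres]
      obtain ⟨hga, hra⟩ := main f1.2 f2.2 (Or.inl ⟨h12', h22''⟩)
      exact ⟨hga, f2.2, Or.inr h22'', hra⟩
    · by_cases hr2 : rank.getD f2.2 0 < rank.getD f1.2 0
      · have hres : pvUnionA n.toNat p rank x y = (f2.1.insert f2.2 f1.2, rank) := by
          simp only [pvUnionA, ← hf1def, ← hf2def, if_neg heq, if_neg hr1, if_pos hr2]
        rw [hres]
        obtain ⟨hga, hra⟩ := main f2.2 f1.2 (Or.inr ⟨h22'', h12'⟩)
        exact ⟨hga, f1.2, Or.inl h12', hra⟩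
      · have hres : pvUnionA n.toNat p rank x y =
            (f2.1.insert f2.2 f1.2, rank.insert f1.2 (rank.getD f1.2 0 + 1)) := by
          simp only [pvUnionA, ← hf1def, ← hf2def, if_neg heq, if_neg hr1, if_neg hr2]
        rw [hres]
        obtain ⟨hga, hra⟩ := main f2.2 f1.2 (Or.inr ⟨h22'', h12'⟩)
        exact ⟨hga, f1.2, Or.inl h12', hra⟩


-- ---------- the label side (port B's state) and the coupled invariant ----------

def pvLF (lab : List Int) : Int → Int := fun x => PySem.List.pyGetD lab x 0


lemma pvLF_set (lab : List Int) (x v z : Int) (hx : 0 ≤ x) (_hx2 : x < (lab.length : Int))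
    (hz : 0 ≤ z) (hz2 : z < (lab.length : Int)) :
    pvLF (PySem.List.pySetD lab x v) z = if z = x then v else pvLF lab z := by
  have hz' : z = ((z.toNat : Nat) : Int) := by omega
  have hzlen : z.toNat < lab.length := by omega
  rw [PySem.List.pySetD_of_nonneg lab v hx, pvLF, pvLF, hz', PySem.List.pyGetD_natCast,
      PySem.List.pyGetD_natCast,
      List.getD_eq_getElem _ _ (by simpa using hzlen), List.getD_eq_getElem _ _ hzlen,
      List.getElem_set]
  by_cases h : z = x
  · rw [if_pos (by omega : x.toNat = z.toNat), if_pos (by omega : ((z.toNat : Nat) : Int) = x)]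
  · rw [if_neg (by omega : ¬ x.toNat = z.toNat), if_neg (by omega : ¬ ((z.toNat : Nat) : Int) = x)]

-- the 'for x in members[old]: label[x] = new' loop
lemma pvSetFold (v : Int) :
    ∀ (ms : List Int) (lab : List Int), (∀ x ∈ ms, 0 ≤ x ∧ x < (lab.length : Int)) →
      (ms.foldl (fun lab x => PySem.List.pySetD lab x v) lab).length = lab.length ∧
      ∀ z, 0 ≤ z → z < (lab.length : Int) →
        pvLF (ms.foldl (fun lab x => PySem.List.pySetD lab x v) lab) z =
          if z ∈ ms then v else pvLF lab z := by
  intro ms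
  induction ms with
  | nil => intro lab _; exact ⟨rfl, fun z _ _ => by simp⟩
  | cons a rest ih =>
      intro lab hms
      have ha := hms a (List.mem_cons_self ..)
      have hlen1 : (PySem.List.pySetD lab a v).length = lab.length := by
        rw [PySem.List.pySetD_of_nonneg lab v ha.1]; simp
      obtain ⟨ihlen, ihlf⟩ := ih (PySem.List.pySetD lab a v)
        (fun x hx => by rw [hlen1]; exact hms x (List.mem_cons_of_mem _ hx))
      rw [List.foldl_cons]
      refine ⟨by rw [ihlen, hlen1], ?_⟩
      intro z hz hz2
      rw [ihlf z hz (by omega : z < ((PySem.List.pySetD lab a v).length : Int)),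
          pvLF_set lab a v z ha.1 ha.2 hz hz2]
      by_cases hzr : z ∈ rest
      · rw [if_pos hzr, if_pos (List.mem_cons_of_mem _ hzr)]
      · rw [if_neg hzr]
        by_cases hza : z = a
        · rw [if_pos hza, if_pos (hza ▸ List.mem_cons_self ..)]
        · rw [if_neg hza, if_neg (by simp [hza, hzr])]

-- {i: [i] for i in range(n)}, looked up
lemma pvFoldInsertSingleton :
    ∀ (l : List Int) (d : PySem.Dict Int (List Int)) (c : Int),
      (l.foldl (fun d i => d.insert i [i]) d).getD c [] =
        if c ∈ l then [c] else d.getD c [] := by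
  intro l
  induction l using List.reverseRecOn with
  | nil => intro d c; simp
  | append_singleton l a ih =>
      intro d c
      rw [List.foldl_append, List.foldl_cons, List.foldl_nil, PySem.Dict.getD_insert]
      by_cases hca : c = a
      · rw [if_pos hca, if_pos (by simp [hca]), hca]
      · rw [if_neg hca, ih]
        by_cases hcl : c ∈ l
        · rw [if_pos hcl, if_pos (by simp [hcl])]
        · rw [if_neg hcl, if_neg (by simp [hca, hcl])]

-- members invariant: for every LIVE label (a label of some node) the members list is exactly
-- its class; stale keys are never looked up
def pvMInv (n : Int) (lab : List Int) (members : PySem.Dict Int (List Int)) : Prop :=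
  (∀ z, 0 ≤ z → z < n → ∀ x ∈ members.getD (pvLF lab z) [],
      0 ≤ x ∧ x < n ∧ pvLF lab x = pvLF lab z) ∧
  (∀ z, 0 ≤ z → z < n → z ∈ members.getD (pvLF lab z) [])

def pvInv (n : Int) (p : PySem.Dict Int Int) (st : List Int × PySem.Dict Int (List Int)) : Prop :=
  st.1.length = n.toNat ∧ pvGood n (pvPF p) ∧ pvMInv n st.1 st.2 ∧
  ∀ x y, 0 ≤ x → x < n → 0 ≤ y → y < n →
    (pvR n (pvPF p) x = pvR n (pvPF p) y ↔ pvLF st.1 x = pvLF st.1 y)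

lemma pvMergedKernel {n : Int} (R R' : Int → Int) (P : Int → Prop) (w : Int)
    (h : ∀ z, 0 ≤ z → z < n → (P z → R' z = w) ∧ (¬ P z → R' z = R z ∧ R z ≠ w)) :
    ∀ x y, 0 ≤ x → x < n → 0 ≤ y → y < n →
      (R' x = R' y ↔ ((P x ∧ P y) ∨ (¬ P x ∧ ¬ P y ∧ R x = R y))) := by
  intro x y hx hx2 hy hy2
  obtain ⟨hxw, hxn⟩ := h x hx hx2
  obtain ⟨hyw, hyn⟩ := h y hy hy2
  by_cases hpx : P x <;> by_cases hpy : P y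
  · simp only [hxw hpx, hyw hpy]; tauto
  · obtain ⟨he, hne⟩ := hyn hpy
    rw [hxw hpx, he]
    constructor
    · intro hh; exact absurd hh.symm hne
    · intro hh; tauto
  · obtain ⟨he, hne⟩ := hxn hpx
    rw [he, hyw hpy]
    constructor
    · intro hh; exact absurd hh hne
    · intro hh; tauto
  · obtain ⟨hex, hnex⟩ := hxn hpx
    obtain ⟨hey, hney⟩ := hyn hpy
    rw [hex, hey]
    tauto

set_option maxHeartbeats 1000000 in
lemma pvStep {n : Int} {p : PySem.Dict Int Int} {st : List Int × PySem.Dict Int (List Int)}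
    {i j : Int} (rank : PySem.Dict Int Int)
    (hi : 0 ≤ i) (hi2 : i < n) (hj : 0 ≤ j) (hj2 : j < n)
    (hinv : pvInv n p st) :
    pvInv n (pvUnionA n.toNat p rank i j).1 (pvRelabel n st i j) := by
  obtain ⟨hlen, hg, ⟨hm1, hm2⟩, hker⟩ := hinv
  obtain ⟨hg', w, hw, hr'⟩ := pvUnion_spec p rank hg hi hi2 hj hj2
  have hn0 : 0 < n := lt_of_le_of_lt hi hi2
  have hlenI : (st.1.length : Int) = n := by rw [hlen]; omega
  by_cases hne : PySem.List.pyGetD st.1 j 0 ≠ PySem.List.pyGetD st.1 i 0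
  · -- the two classes are merged on both sides
    have hrel : pvRelabel n st i j =
        ((st.2.getD (if PySem.List.len (st.2.getD (PySem.List.pyGetD st.1 i 0) []) <
              PySem.List.len (st.2.getD (PySem.List.pyGetD st.1 j 0) [])
            then PySem.List.pyGetD st.1 i 0 else PySem.List.pyGetD st.1 j 0) []).foldl
            (fun lab x => PySem.List.pySetD lab x
              (if PySem.List.len (st.2.getD (PySem.List.pyGetD st.1 i 0) []) <
                  PySem.List.len (st.2.getD (PySem.List.pyGetD st.1 j 0) [])
                then PySem.List.pyGetD st.1 j 0 else PySem.List.pyGetD st.1 i 0)) st.1,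
         st.2.modify
            (if PySem.List.len (st.2.getD (PySem.List.pyGetD st.1 i 0) []) <
                PySem.List.len (st.2.getD (PySem.List.pyGetD st.1 j 0) [])
              then PySem.List.pyGetD st.1 j 0 else PySem.List.pyGetD st.1 i 0) []
            (· ++ st.2.getD (if PySem.List.len (st.2.getD (PySem.List.pyGetD st.1 i 0) []) <
                PySem.List.len (st.2.getD (PySem.List.pyGetD st.1 j 0) [])
              then PySem.List.pyGetD st.1 i 0 else PySem.List.pyGetD st.1 j 0) [])) := by
      rw [pvRelabel, if_pos ⟨⟨hj, hj2⟩, hne⟩]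
    set nw := (if PySem.List.len (st.2.getD (PySem.List.pyGetD st.1 i 0) []) <
        PySem.List.len (st.2.getD (PySem.List.pyGetD st.1 j 0) [])
      then PySem.List.pyGetD st.1 j 0 else PySem.List.pyGetD st.1 i 0) with hnw
    set od := (if PySem.List.len (st.2.getD (PySem.List.pyGetD st.1 i 0) []) <
        PySem.List.len (st.2.getD (PySem.List.pyGetD st.1 j 0) [])
      then PySem.List.pyGetD st.1 i 0 else PySem.List.pyGetD st.1 j 0) with hod
    set ms := st.2.getD od [] with hms
    set lab' := ms.foldl (fun lab x => PySem.List.pySetD lab x nw) st.1 with hlab'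
    have hrel' : pvRelabel n st i j = (lab', st.2.modify nw [] (· ++ ms)) := hrel
    rw [hrel']
    have hlf_eq : pvLF st.1 j ≠ pvLF st.1 i := hne
    have hnwod : ({nw, od} : Set Int) = {pvLF st.1 i, pvLF st.1 j} := by
      rw [hnw, hod]
      by_cases hsw : PySem.List.len (st.2.getD (PySem.List.pyGetD st.1 i 0) []) <
          PySem.List.len (st.2.getD (PySem.List.pyGetD st.1 j 0) [])
      · rw [if_pos hsw, if_pos hsw]
        exact Set.pair_comm _ _
      · rw [if_neg hsw, if_neg hsw]
        rfl
    have hnwcase : (nw = pvLF st.1 i ∧ od = pvLF st.1 j) ∨ (nw = pvLF st.1 j ∧ od = pvLF st.1 i) := by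
      rw [hnw, hod]
      by_cases hsw : PySem.List.len (st.2.getD (PySem.List.pyGetD st.1 i 0) []) <
          PySem.List.len (st.2.getD (PySem.List.pyGetD st.1 j 0) [])
      · rw [if_pos hsw, if_pos hsw]; exact Or.inr ⟨rfl, rfl⟩
      · rw [if_neg hsw, if_neg hsw]; exact Or.inl ⟨rfl, rfl⟩
    have hodnw : od ≠ nw := by
      rcases hnwcase with ⟨h1, h2⟩ | ⟨h1, h2⟩
      · rw [h1, h2]; exact hne
      · rw [h1, h2]; exact fun h => hne h.symm
    -- the live-class facts
    have hlive : ∀ c, (c = pvLF st.1 i ∨ c = pvLF st.1 j) →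
        ∀ x ∈ st.2.getD c [], 0 ≤ x ∧ x < n ∧ pvLF st.1 x = c := by
      intro c hc x hx
      rcases hc with rfl | rfl
      · exact hm1 i hi hi2 x hx
      · exact hm1 j hj hj2 x hx
    have hodlive : od = pvLF st.1 i ∨ od = pvLF st.1 j := by
      rcases hnwcase with ⟨_, h2⟩ | ⟨_, h2⟩
      · exact Or.inr h2
      · exact Or.inl h2
    have hnwlive : nw = pvLF st.1 i ∨ nw = pvLF st.1 j := by
      rcases hnwcase with ⟨h1, _⟩ | ⟨h1, _⟩
      · exact Or.inl h1
      · exact Or.inr h1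
    have hmsfact := hlive od hodlive
    have hmsmem : ∀ z, 0 ≤ z → z < n → (z ∈ ms ↔ pvLF st.1 z = od) := by
      intro z hz hz2
      constructor
      · intro hzm; exact (hmsfact z hzm).2.2
      · intro hlz; have := hm2 z hz hz2; rw [hlz] at this; exact this
    obtain ⟨hlen', hlf'⟩ := pvSetFold nw ms st.1
      (fun x hx => ⟨(hmsfact x hx).1, by rw [hlenI]; exact (hmsfact x hx).2.1⟩)
    have hlf : ∀ z, 0 ≤ z → z < n →
        pvLF lab' z = if pvLF st.1 z = od then nw else pvLF st.1 z := by
      intro z hz hz2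
      rw [hlab', hlf' z hz (by omega)]
      by_cases hzm : z ∈ ms
      · rw [if_pos hzm, if_pos ((hmsmem z hz hz2).mp hzm)]
      · rw [if_neg hzm, if_neg (fun h => hzm ((hmsmem z hz hz2).mpr h))]
    refine ⟨by rw [hlab', hlen', hlen], hg', ?_, ?_⟩
    · -- members invariant is re-established
      have hget' : ∀ c, (st.2.modify nw [] (· ++ ms)).getD c [] =
          if c = nw then st.2.getD nw [] ++ ms else st.2.getD c [] := by
        intro c
        rw [PySem.Dict.getD_modify]
      constructor
      · intro z hz hz2 x hx
        show 0 ≤ x ∧ x < n ∧ pvLF lab' x = pvLF lab' z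
        by_cases hc : pvLF st.1 z = od
        · have hcz : pvLF lab' z = nw := by rw [hlf z hz hz2, if_pos hc]
          rw [hcz, hget', if_pos rfl] at hx
          rw [hcz]
          rcases List.mem_append.mp hx with hx1 | hx1
          · obtain ⟨hr1, hr2, hr3⟩ := hlive nw hnwlive x hx1
            exact ⟨hr1, hr2, by rw [hlf x hr1 hr2, hr3, if_neg hodnw.symm]⟩
          · obtain ⟨hr1, hr2, hr3⟩ := hmsfact x hx1
            exact ⟨hr1, hr2, by rw [hlf x hr1 hr2, if_pos hr3]⟩
        · have hcz : pvLF lab' z = pvLF st.1 z := by rw [hlf z hz hz2, if_neg hc]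
          by_cases hcnw : pvLF st.1 z = nw
          · rw [hcz, hcnw, hget', if_pos rfl] at hx
            rw [hcz, hcnw]
            rcases List.mem_append.mp hx with hx1 | hx1
            · obtain ⟨hr1, hr2, hr3⟩ := hlive nw hnwlive x hx1
              exact ⟨hr1, hr2, by rw [hlf x hr1 hr2, hr3, if_neg hodnw.symm]⟩
            · obtain ⟨hr1, hr2, hr3⟩ := hmsfact x hx1
              exact ⟨hr1, hr2, by rw [hlf x hr1 hr2, if_pos hr3]⟩
          · rw [hcz, hget', if_neg hcnw] at hx
            obtain ⟨hr1, hr2, hr3⟩ := hm1 z hz hz2 x hx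
            rw [hcz]
            refine ⟨hr1, hr2, ?_⟩
            rw [hlf x hr1 hr2, hr3, if_neg hc]
      · intro z hz hz2
        have hget' : ∀ c, (st.2.modify nw [] (· ++ ms)).getD c [] =
            if c = nw then st.2.getD nw [] ++ ms else st.2.getD c [] := by
          intro c; rw [PySem.Dict.getD_modify]
        by_cases hc : pvLF st.1 z = od
        · have hcz : pvLF lab' z = nw := by rw [hlf z hz hz2, if_pos hc]
          rw [hcz, hget', if_pos rfl]
          exact List.mem_append.mpr (Or.inr ((hmsmem z hz hz2).mpr hc))
        · have hcz : pvLF lab' z = pvLF st.1 z := by rw [hlf z hz hz2, if_neg hc]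
          rw [hcz, hget']
          by_cases hcnw : pvLF st.1 z = nw
          · rw [if_pos hcnw]
            have := hm2 z hz hz2
            rw [hcnw] at this
            exact List.mem_append.mpr (Or.inl this)
          · rw [if_neg hcnw]
            exact hm2 z hz hz2
    · -- the kernel is preserved
      have hRne : pvR n (pvPF p) i ≠ pvR n (pvPF p) j := by
        intro h
        exact hne (((hker i j hi hi2 hj hj2).mp h).symm)
      have hA := pvMergedKernel (n := n) (pvR n (pvPF p)) (pvR n (pvPF (pvUnionA n.toNat p rank i j).1))
        (fun z => pvR n (pvPF p) z = pvR n (pvPF p) i ∨ pvR n (pvPF p) z = pvR n (pvPF p) j) w ?hA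
      case hA =>
        intro z hz hz2
        constructor
        · intro hp; rw [hr' z hz hz2, if_pos hp]
        · intro hp
          refine ⟨by rw [hr' z hz hz2, if_neg hp], ?_⟩
          intro hzw
          rcases hw with rfl | rfl
          · exact hp (Or.inl hzw)
          · exact hp (Or.inr hzw)
      have hB := pvMergedKernel (n := n) (pvLF st.1) (pvLF lab')
        (fun z => pvLF st.1 z = nw ∨ pvLF st.1 z = od) nw ?hB
      case hB =>
        intro z hz hz2
        constructor
        · intro hp
          rw [hlf z hz hz2]
          rcases hp with hp | hp
          · rw [if_neg (by rw [hp]; exact hodnw.symm), hp]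
          · rw [if_pos hp]
        · intro hp
          have h1 : pvLF st.1 z ≠ nw := fun hc => hp (Or.inl hc)
          have h2 : pvLF st.1 z ≠ od := fun hc => hp (Or.inr hc)
          exact ⟨by rw [hlf z hz hz2, if_neg h2], h1⟩
      intro x y hx hx2 hy hy2
      have hPQ : ∀ z, 0 ≤ z → z < n →
          ((pvR n (pvPF p) z = pvR n (pvPF p) i ∨ pvR n (pvPF p) z = pvR n (pvPF p) j) ↔
           (pvLF st.1 z = nw ∨ pvLF st.1 z = od)) := by
        intro z hz hz2
        have hk1 := hker z i hz hz2 hi hi2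
        have hk2 := hker z j hz hz2 hj hj2
        rcases hnwcase with ⟨h1, h2⟩ | ⟨h1, h2⟩
        · rw [h1, h2, hk1, hk2]
        · rw [h1, h2, hk1, hk2]; tauto
      have h1 := hPQ x hx hx2
      have h2 := hPQ y hy hy2
      have h3 := hker x y hx hx2 hy hy2
      rw [hA x y hx hx2 hy hy2, hB x y hx hx2 hy hy2]
      constructor
      · rintro (⟨ha, hb⟩ | ⟨ha, hb, hc⟩)
        · exact Or.inl ⟨h1.mp ha, h2.mp hb⟩
        · exact Or.inr ⟨fun q => ha (h1.mpr q), fun q => hb (h2.mpr q), h3.mp hc⟩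
      · rintro (⟨ha, hb⟩ | ⟨ha, hb, hc⟩)
        · exact Or.inl ⟨h1.mpr ha, h2.mpr hb⟩
        · exact Or.inr ⟨fun q => ha (h1.mp q), fun q => hb (h2.mp q), h3.mpr hc⟩
  · -- the two endpoints are already in the same class: A only compresses paths
    have hrel : pvRelabel n st i j = st := by
      rw [pvRelabel, if_neg (by tauto)]
    rw [hrel]
    rw [not_not] at hne
    have hReq : pvR n (pvPF p) i = pvR n (pvPF p) j :=
      (hker i j hi hi2 hj hj2).mpr hne.symm
    refine ⟨hlen, hg', ⟨hm1, hm2⟩, ?_⟩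
    have hsame : ∀ z, 0 ≤ z → z < n →
        pvR n (pvPF (pvUnionA n.toNat p rank i j).1) z = pvR n (pvPF p) z := by
      intro z hz hz2
      rw [hr' z hz hz2]
      by_cases hc : pvR n (pvPF p) z = pvR n (pvPF p) i ∨ pvR n (pvPF p) z = pvR n (pvPF p) j
      · rw [if_pos hc]
        have hzi : pvR n (pvPF p) z = pvR n (pvPF p) i := by
          rcases hc with h | h
          · exact h
          · rw [h, hReq]
        rcases hw with rfl | rfl
        · exact hzi.symm
        · rw [← hReq]; exact hzi.symm
      · rw [if_neg hc]
    intro x y hx hx2 hy hy2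
    rw [hsame x hx hx2, hsame y hy hy2]
    exact hker x y hx hx2 hy hy2

-- ---------- the two edge-processing folds, coupled ----------

lemma pvInnerFold {n : Int} {i : Int} (hi : 0 ≤ i) (hi2 : i < n) :
    ∀ (js : List Int) (p rank : PySem.Dict Int Int)
      (st : List Int × PySem.Dict Int (List Int)), pvInv n p st →
      pvInv n
        (js.foldl (fun pr j => if 0 ≤ j ∧ j < n then pvUnionA n.toNat pr.1 pr.2 i j else pr)
          (p, rank)).1
        (js.foldl (fun st j => pvRelabel n st i j) st) := by
  intro js
  induction js with
  | nil => intro p rank st hinv; exact hinv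
  | cons j rest ih =>
      intro p rank st hinv
      rw [List.foldl_cons, List.foldl_cons]
      by_cases hjr : 0 ≤ j ∧ j < n
      · rw [if_pos hjr]
        exact ih (pvUnionA n.toNat p rank i j).1 (pvUnionA n.toNat p rank i j).2 _
          (pvStep rank hi hi2 hjr.1 hjr.2 hinv)
      · rw [if_neg hjr]
        have hrel : pvRelabel n st i j = st := by
          rw [pvRelabel, if_neg (by tauto)]
        rw [hrel]
        exact ih p rank st hinv

lemma pvOuterFold {n : Int} (G : Int → List Int) :
    ∀ (l : List Int), (∀ i ∈ l, 0 ≤ i ∧ i < n) →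
      ∀ (p rank : PySem.Dict Int Int) (st : List Int × PySem.Dict Int (List Int)), pvInv n p st →
      pvInv n
        (l.foldl (fun pr i =>
            (G i).foldl (fun pr j => if 0 ≤ j ∧ j < n then pvUnionA n.toNat pr.1 pr.2 i j else pr) pr)
          (p, rank)).1
        (l.foldl (fun st i => (G i).foldl (fun st j => pvRelabel n st i j) st) st) := by
  intro l
  induction l with
  | nil => intro _ p rank st hinv; exact hinv
  | cons i rest ih =>
      intro hmem p rank st hinv
      have hi := hmem i (List.mem_cons_self ..)
      have hstep := pvInnerFold hi.1 hi.2 (G i) p rank st hinv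
      rw [List.foldl_cons, List.foldl_cons]
      have := ih (fun x hx => hmem x (List.mem_cons_of_mem _ hx))
        ((G i).foldl (fun pr j => if 0 ≤ j ∧ j < n then pvUnionA n.toNat pr.1 pr.2 i j else pr)
          (p, rank)).1
        ((G i).foldl (fun pr j => if 0 ≤ j ∧ j < n then pvUnionA n.toNat pr.1 pr.2 i j else pr)
          (p, rank)).2
        _ hstep
      simpa using this

-- ---------- the initial state satisfies the invariant ----------

lemma pvParent0_id (l : List Int) (d : PySem.Dict Int Int) (hd : ∀ x, d.getD x x = x) :
    ∀ x, (l.foldl (fun d i => d.insert i i) d).getD x x = x := by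
  induction l generalizing d with
  | nil => exact hd
  | cons a rest ih =>
      rw [List.foldl_cons]
      refine ih (d.insert a a) ?_
      intro x
      rw [PySem.Dict.getD_insert]
      by_cases hxa : x = a
      · rw [if_pos hxa, hxa]
      · rw [if_neg hxa]; exact hd x

lemma pvInv_init {n : Int} (hn : 0 < n) :
    pvInv n ((PySem.List.pyRange 0 n 1).foldl (fun d i => d.insert i i) PySem.Dict.empty)
      (PySem.List.pyRange 0 n 1,
       (PySem.List.pyRange 0 n 1).foldl
         (fun (d : PySem.Dict Int (List Int)) i => d.insert i [i]) PySem.Dict.empty) := by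
  have hid : ∀ x, pvPF ((PySem.List.pyRange 0 n 1).foldl (fun d i => d.insert i i) PySem.Dict.empty) x = x := by
    intro x
    exact pvParent0_id _ _ (fun x => by simp [PySem.Dict.getD_empty]) x
  have hlen : (PySem.List.pyRange 0 n 1).length = n.toNat := by
    rw [PySem.List.length_pyRange_one]; congr 1; omega
  have hlf : ∀ x, 0 ≤ x → x < n → pvLF (PySem.List.pyRange 0 n 1) x = x := by
    intro x hx hx2
    have hk : x.toNat < (PySem.List.pyRange 0 n 1).length := by omega
    have hx' : x = ((x.toNat : Nat) : Int) := by omega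
    rw [pvLF, hx', PySem.List.pyGetD_natCast, List.getD_eq_getElem _ _ hk,
        PySem.List.getElem_pyRange_one]
    omega
  have hmem0 : ∀ c, ((PySem.List.pyRange 0 n 1).foldl
      (fun (d : PySem.Dict Int (List Int)) i => d.insert i [i]) PySem.Dict.empty).getD c [] =
      if 0 ≤ c ∧ c < n then [c] else [] := by
    intro c
    rw [pvFoldInsertSingleton]
    by_cases hc : c ∈ PySem.List.pyRange 0 n 1
    · rw [if_pos hc, if_pos (PySem.List.mem_pyRange_one.mp hc)]
    · rw [if_neg hc, if_neg (fun h => hc (PySem.List.mem_pyRange_one.mpr h)),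
          PySem.Dict.getD_empty]
  have hgood : pvGood n (pvPF ((PySem.List.pyRange 0 n 1).foldl (fun d i => d.insert i i) PySem.Dict.empty)) := by
    intro x hx hx2
    rw [hid x]
    exact ⟨⟨hx, hx2⟩, ⟨0, by simp [pvIter, hid]⟩⟩
  refine ⟨hlen, hgood, ⟨?_, ?_⟩, ?_⟩
  · intro z hz hz2 x hx
    rw [hlf z hz hz2, hmem0 z, if_pos ⟨hz, hz2⟩, List.mem_singleton] at hx
    subst hx
    exact ⟨hz, hz2, rfl⟩
  · intro z hz hz2
    rw [hlf z hz hz2, hmem0 z, if_pos ⟨hz, hz2⟩]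
    exact List.mem_singleton.mpr rfl
  · intro x y hx hx2 hy hy2
    rw [pvR_of_fix hgood hx hx2 (hid x), pvR_of_fix hgood hy hy2 (hid y),
        hlf x hx hx2, hlf y hy hy2]

-- ---------- the grouping loop: find-threading reduces to a pure keyed fold ----------

lemma pvGroupFoldA {n : Int} (κ : Int → Int) :
    ∀ (l : List Int), (∀ i ∈ l, 0 ≤ i ∧ i < n) →
    ∀ (p : PySem.Dict Int Int) (gd : PySem.Dict Int (List Int)),
      pvGood n (pvPF p) → (∀ z, 0 ≤ z → z < n → pvR n (pvPF p) z = κ z) →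
      (l.foldl
        (fun (st : PySem.Dict Int Int × PySem.Dict Int (List Int)) i =>
          let f := pvFindA n.toNat st.1 i
          (f.1, st.2.modify f.2 [] (· ++ [i])))
        (p, gd)).2
      = l.foldl (fun gd i => gd.modify (κ i) [] (· ++ [i])) gd := by
  intro l
  induction l with
  | nil => intro _ p gd _ _; rfl
  | cons i rest ih =>
      intro hmem p gd hg hκ
      have hi := hmem i (List.mem_cons_self ..)
      obtain ⟨k, hk, hfix⟩ := pvFix_lt_n hg hi.1 hi.2
      obtain ⟨h2, hg', hpres⟩ := pvFind_spec n.toNat p i k hg hi.1 hi.2 hfix hk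
      rw [List.foldl_cons, List.foldl_cons]
      have hstep : (let f := pvFindA n.toNat (p, gd).1 i
          ((f.1, (p, gd).2.modify f.2 [] (· ++ [i])) : PySem.Dict Int Int × PySem.Dict Int (List Int)))
          = ((pvFindA n.toNat p i).1, gd.modify (κ i) [] (· ++ [i])) := by
        show ((pvFindA n.toNat p i).1, gd.modify (pvFindA n.toNat p i).2 [] (· ++ [i])) = _
        rw [h2, hκ i hi.1 hi.2]
      rw [hstep]
      exact ih (fun x hx => hmem x (List.mem_cons_of_mem _ hx)) _ _ hg'
        (fun z hz hz2 => by rw [hpres z hz hz2]; exact hκ z hz hz2)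

-- ---------- the grouping dict's values, in closed form ----------

lemma pvValuesChar (κ : Int → Int) (l : List Int) :
    (l.foldl (fun (gd : PySem.Dict Int (List Int)) x => gd.modify (κ x) [] (· ++ [x]))
        PySem.Dict.empty).values
      = (PySem.Set.ofList (l.map κ)).map (fun c => l.filter (fun x => κ x == c)) := by
  set gd := l.foldl (fun (gd : PySem.Dict Int (List Int)) x => gd.modify (κ x) [] (· ++ [x]))
    PySem.Dict.empty with hgd
  have hkeys : gd.keys = PySem.Set.ofList (l.map κ) := by
    rw [hgd, PySem.Dict.keys_foldl_modify_key]
    simp [PySem.Set.update_nil_left]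
  have hnd : gd.keys.Nodup := by
    rw [hkeys]; exact PySem.Set.nodup_ofList _
  have hget : ∀ c, gd.getD c [] = l.filter (fun x => κ x == c) := by
    intro c
    have hfoldmap : gd = (l.map (fun x => ((κ x : Int), x))).foldl
        (fun (d : PySem.Dict Int (List Int)) pr => d.modify pr.1 [] (· ++ [pr.2]))
        PySem.Dict.empty := by
      rw [hgd, List.foldl_map]
    rw [hfoldmap, PySem.Dict.getD_foldl_modify_append]
    rw [PySem.Dict.getD_empty]
    rw [List.filter_map, List.map_map]
    simp [Function.comp_def]
  rw [PySem.Dict.values_eq_map_keys gd hnd [], hkeys]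
  exact List.map_congr_left (fun c _ => hget c)


-- ---------- two keyings with the same kernel produce the same grouped values ----------

lemma pvValuesCongr (κ1 κ2 : Int → Int) :
    ∀ (l : List Int), (∀ x ∈ l, ∀ y ∈ l, (κ1 x = κ1 y ↔ κ2 x = κ2 y)) →
      (PySem.Set.ofList (l.map κ1)).map (fun c => l.filter (fun x => κ1 x == c)) =
      (PySem.Set.ofList (l.map κ2)).map (fun c => l.filter (fun x => κ2 x == c)) := by
  intro l
  induction l using List.reverseRecOn with
  | nil => intro _; rfl
  | append_singleton l a ih =>
      intro hker
      have hker' : ∀ x ∈ l, ∀ y ∈ l, (κ1 x = κ1 y ↔ κ2 x = κ2 y) := fun x hx y hy =>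
        hker x (List.mem_append_left _ hx) y (List.mem_append_left _ hy)
      have IH := ih hker'
      have hmema : a ∈ l ++ [a] := List.mem_append_right _ (List.mem_singleton.mpr rfl)
      have hmem12 : (κ1 a ∈ l.map κ1) ↔ (κ2 a ∈ l.map κ2) := by
        simp only [List.mem_map]
        constructor
        · rintro ⟨i, hi, hia⟩
          exact ⟨i, hi, ((hker i (List.mem_append_left _ hi) a hmema).mp hia)⟩
        · rintro ⟨i, hi, hia⟩
          exact ⟨i, hi, ((hker i (List.mem_append_left _ hi) a hmema).mpr hia)⟩
      have hmap1 : (l ++ [a]).map κ1 = l.map κ1 ++ [κ1 a] := by simp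
      have hmap2 : (l ++ [a]).map κ2 = l.map κ2 ++ [κ2 a] := by simp
      have hfilt : ∀ (κ : Int → Int) (c : Int),
          (l ++ [a]).filter (fun x => κ x == c) =
            l.filter (fun x => κ x == c) ++ (if κ a = c then [a] else []) := by
        intro κ c
        rw [List.filter_append]
        congr 1
        by_cases h : κ a = c
        · simp [h]
        · simp [h]
      rw [hmap1, hmap2, PySem.Set.ofList_append_singleton, PySem.Set.ofList_append_singleton]
      by_cases hseen : κ1 a ∈ l.map κ1
      · have hseen2 : κ2 a ∈ l.map κ2 := hmem12.mp hseen
        rw [PySem.Set.add_of_mem (by rw [← PySem.List.dedup_eq_ofList]; exact (PySem.List.mem_dedup _ _).mpr hseen),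
            PySem.Set.add_of_mem (by rw [← PySem.List.dedup_eq_ofList]; exact (PySem.List.mem_dedup _ _).mpr hseen2)]
        set s1 := PySem.Set.ofList (l.map κ1) with hs1
        set s2 := PySem.Set.ofList (l.map κ2) with hs2
        have hlen : s1.length = s2.length := by
          have h1 := congrArg List.length IH
          simpa using h1
        apply List.ext_getElem (by simpa using hlen)
        intro t ht1 ht2
        simp only [List.getElem_map]
        have hts1 : t < s1.length := by simpa using ht1
        have hts2 : t < s2.length := by simpa using ht2
        have hIHt : l.filter (fun x => κ1 x == s1[t]) = l.filter (fun x => κ2 x == s2[t]) := by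
          have := congrArg (fun ll => ll[t]?) IH
          simp only [List.getElem?_map] at this
          rw [List.getElem?_eq_getElem hts1, List.getElem?_eq_getElem hts2] at this
          simpa using this
        have hc1mem : s1[t] ∈ l.map κ1 := by
          have h' : s1[t] ∈ PySem.Set.ofList (l.map κ1) := by
            rw [← hs1]; exact List.getElem_mem _
          exact (PySem.List.mem_dedup _ _).mp h'
        have hc2mem : s2[t] ∈ l.map κ2 := by
          have h' : s2[t] ∈ PySem.Set.ofList (l.map κ2) := by
            rw [← hs2]; exact List.getElem_mem _
          exact (PySem.List.mem_dedup _ _).mp h'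
        obtain ⟨i1, hi1, hi1e⟩ := List.mem_map.mp hc1mem
        obtain ⟨i2, hi2, hi2e⟩ := List.mem_map.mp hc2mem
        have hcond : (κ1 a = s1[t]) ↔ (κ2 a = s2[t]) := by
          constructor
          · intro h
            have hk : κ2 a = κ2 i1 :=
              (hker a hmema i1 (List.mem_append_left _ hi1)).mp (by rw [h, hi1e])
            have hi1f : i1 ∈ l.filter (fun x => κ1 x == s1[t]) :=
              List.mem_filter.mpr ⟨hi1, by simp [hi1e]⟩
            rw [hIHt] at hi1f
            have := (List.mem_filter.mp hi1f).2
            simp only [beq_iff_eq] at this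
            rw [hk, this]
          · intro h
            have hk : κ1 a = κ1 i2 :=
              (hker a hmema i2 (List.mem_append_left _ hi2)).mpr (by rw [h, hi2e])
            have hi2f : i2 ∈ l.filter (fun x => κ2 x == s2[t]) :=
              List.mem_filter.mpr ⟨hi2, by simp [hi2e]⟩
            rw [← hIHt] at hi2f
            have := (List.mem_filter.mp hi2f).2
            simp only [beq_iff_eq] at this
            rw [hk, this]
        rw [hfilt κ1, hfilt κ2, hIHt]
        by_cases hca : κ1 a = s1[t]
        · rw [if_pos hca, if_pos (hcond.mp hca)]
        · rw [if_neg hca, if_neg (fun h => hca (hcond.mpr h))]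
      · have hseen2 : ¬ (κ2 a ∈ l.map κ2) := fun h => hseen (hmem12.mpr h)
        rw [PySem.Set.add_of_not_mem (by rw [← PySem.List.dedup_eq_ofList]; exact fun h => hseen ((PySem.List.mem_dedup _ _).mp h)),
            PySem.Set.add_of_not_mem (by rw [← PySem.List.dedup_eq_ofList]; exact fun h => hseen2 ((PySem.List.mem_dedup _ _).mp h))]
        rw [List.map_append, List.map_append]
        have hmapold : ∀ (κ : Int → Int), (¬ κ a ∈ l.map κ) →
            (PySem.Set.ofList (l.map κ)).map (fun c => (l ++ [a]).filter (fun x => κ x == c)) =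
            (PySem.Set.ofList (l.map κ)).map (fun c => l.filter (fun x => κ x == c)) := by
          intro κ hnm
          apply List.map_congr_left
          intro c hc
          have hc' := (PySem.List.mem_dedup _ _).mp hc
          have hne : κ a ≠ c := by
            intro h; rw [h] at hnm; exact hnm hc'
          rw [hfilt κ c, if_neg hne, List.append_nil]
        have hnew : ∀ (κ : Int → Int), (¬ κ a ∈ l.map κ) →
            (l ++ [a]).filter (fun x => κ x == κ a) = [a] := by
          intro κ hnm
          rw [hfilt κ (κ a), if_pos rfl]
          have : l.filter (fun x => κ x == κ a) = [] := by
            rw [List.filter_eq_nil_iff]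
            intro x hx
            simp only [beq_iff_eq]
            intro h
            exact hnm (List.mem_map.mpr ⟨x, hx, h⟩)
          rw [this]; rfl
        rw [hmapold κ1 hseen, hmapold κ2 hseen2]
        simp only [List.map_cons, List.map_nil]
        rw [hnew κ1 hseen, hnew κ2 hseen2, IH]


-- ---------- assembling the equivalence ----------

lemma pvMainNonpos (graph : List (Int × List Int)) (n : Int) (hn : n ≤ 0) :
    group_and_sort_by_connections_py graph n = group_and_sort_by_connections_py_alt graph n := by
  by_cases h0 : n = 0
  · subst h0; rfl
  · unfold group_and_sort_by_connections_py group_and_sort_by_connections_py_alt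
    rw [if_neg h0, PySem.List.pyRange_one_eq_nil (by omega)]
    rfl

-- proof-side names for the stages of the two ports (definitionally equal to the port bodies)

def pvPR (graph : List (Int × List Int)) (n : Int) : PySem.Dict Int Int × PySem.Dict Int Int :=
  (PySem.List.pyRange 0 n 1).foldl
    (fun (pr : PySem.Dict Int Int × PySem.Dict Int Int) i =>
      ((PySem.Dict.mk graph).getD i []).foldl
        (fun pr j => if 0 ≤ j ∧ j < n then pvUnionA n.toNat pr.1 pr.2 i j else pr) pr)
    ((PySem.List.pyRange 0 n 1).foldl (fun d i => d.insert i i) PySem.Dict.empty,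
     (PySem.List.pyRange 0 n 1).foldl (fun d i => d.insert i 0) PySem.Dict.empty)

def pvGroupsA (graph : List (Int × List Int)) (n : Int) : List (List Int) :=
  ((PySem.List.pyRange 0 n 1).foldl
    (fun (st : PySem.Dict Int Int × PySem.Dict Int (List Int)) i =>
      let f := pvFindA n.toNat st.1 i
      (f.1, st.2.modify f.2 [] (· ++ [i])))
    ((pvPR graph n).1, PySem.Dict.empty)).2.values

def pvTailA (graph : List (Int × List Int)) (groups : List (List Int)) : List Int :=
  let groupsMult := groups.filter (fun g => 1 < g.length)
  let groupsSingle := groups.filter (fun g => g.length = 1)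
  let multSorted := PySem.List.sorted2 groupsMult (fun g => -(PySem.List.len g))
    (fun g => ((PySem.List.min? g (fun x => x)).getD 0)) false
  let sortedGroups := multSorted.foldl (fun acc g => acc ++ [pvCmOrder graph g]) []
  let singleSorted := PySem.List.sorted groupsSingle (fun g => PySem.List.pyGetD g 0 0) false
  (sortedGroups ++ singleSorted).flatMap (fun g => g)

def pvLabelB (graph : List (Int × List Int)) (n : Int) : List Int :=
  ((PySem.List.pyRange 0 n 1).foldl
    (fun st i =>
      ((PySem.Dict.mk graph).getD i []).foldl (fun st j => pvRelabel n st i j) st)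
    (PySem.List.pyRange 0 n 1,
     (PySem.List.pyRange 0 n 1).foldl
       (fun (d : PySem.Dict Int (List Int)) i => d.insert i [i]) PySem.Dict.empty)).1

def pvGroupsB (graph : List (Int × List Int)) (n : Int) : List (List Int) :=
  ((PySem.List.pyRange 0 n 1).foldl
    (fun (d : PySem.Dict Int (List Int)) i =>
      d.modify (PySem.List.pyGetD (pvLabelB graph n) i 0) [] (· ++ [i]))
    PySem.Dict.empty).values

def pvTailB (graph : List (Int × List Int)) (groups : List (List Int)) : List Int :=
  let mult := PySem.List.sorted2 (groups.filter (fun g => 1 < g.length))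
    (fun g => -(PySem.List.len g)) (fun g => ((PySem.List.min? g (fun x => x)).getD 0)) false
  let single := PySem.List.sorted (groups.filter (fun g => g.length = 1))
    (fun g => PySem.List.pyGetD g 0 0) false
  (mult.map (fun g => pvCmOrder graph g)).flatten ++ single.flatten

lemma pvTail_eq (graph : List (Int × List Int)) (G : List (List Int)) :
    pvTailA graph G = pvTailB graph G := by
  unfold pvTailA pvTailB
  dsimp only
  rw [PySem.List.foldl_append_singleton_eq_map]
  rw [List.flatMap_append]
  simp only [List.nil_append, List.flatMap_id']

lemma pvGroups_eq (graph : List (Int × List Int)) (n : Int) (hn : 0 < n) :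
    pvGroupsA graph n = pvGroupsB graph n := by
  have hmem : ∀ i ∈ PySem.List.pyRange 0 n 1, 0 ≤ i ∧ i < n := by
    intro i hi
    rw [PySem.List.mem_pyRange_one] at hi
    exact hi
  have hinv := pvOuterFold (fun i => (PySem.Dict.mk graph).getD i []) (PySem.List.pyRange 0 n 1) hmem
      ((PySem.List.pyRange 0 n 1).foldl (fun d i => d.insert i i) PySem.Dict.empty)
      ((PySem.List.pyRange 0 n 1).foldl (fun d i => d.insert i 0) PySem.Dict.empty)
      (PySem.List.pyRange 0 n 1,
       (PySem.List.pyRange 0 n 1).foldl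
         (fun (d : PySem.Dict Int (List Int)) i => d.insert i [i]) PySem.Dict.empty)
      (pvInv_init hn)
  obtain ⟨hlen, hgood, hminv, hker⟩ := hinv
  have hA : pvGroupsA graph n =
      (PySem.Set.ofList ((PySem.List.pyRange 0 n 1).map (fun i => pvR n (pvPF (pvPR graph n).1) i))).map
        (fun c => (PySem.List.pyRange 0 n 1).filter (fun x => pvR n (pvPF (pvPR graph n).1) x == c)) := by
    unfold pvGroupsA
    rw [pvGroupFoldA (fun i => pvR n (pvPF (pvPR graph n).1) i) (PySem.List.pyRange 0 n 1) hmem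
      (pvPR graph n).1 PySem.Dict.empty hgood (fun z _ _ => rfl)]
    exact pvValuesChar _ _
  have hB : pvGroupsB graph n =
      (PySem.Set.ofList ((PySem.List.pyRange 0 n 1).map (fun i => PySem.List.pyGetD (pvLabelB graph n) i 0))).map
        (fun c => (PySem.List.pyRange 0 n 1).filter (fun x => PySem.List.pyGetD (pvLabelB graph n) x 0 == c)) := by
    unfold pvGroupsB
    exact pvValuesChar _ _
  rw [hA, hB]
  apply pvValuesCongr
  intro x hx y hy
  have hx' := hmem x hx
  have hy' := hmem y hy
  exact hker x y hx'.1 hx'.2 hy'.1 hy'.2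

lemma pvMainPos (graph : List (Int × List Int)) (n : Int) (hn : 0 < n) :
    group_and_sort_by_connections_py graph n = group_and_sort_by_connections_py_alt graph n := by
  have hA : group_and_sort_by_connections_py graph n =
      if n = 0 then [] else pvTailA graph (pvGroupsA graph n) := rfl
  have hB : group_and_sort_by_connections_py_alt graph n = pvTailB graph (pvGroupsB graph n) := rfl
  rw [hA, hB, if_neg (by omega : ¬ n = 0), pvGroups_eq graph n hn, pvTail_eq]

-- ===== VERDICT (by name: the statement is the Claim_ definition above) =====
theorem group_and_sort_by_connections_py_spec : Claim_equal_group_and_sort_by_connections_py := by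
  unfold Claim_equal_group_and_sort_by_connections_py
  intro graph n _hdom
  unfold Spec_group_and_sort_by_connections_py
  by_cases hn : 0 < n
  · exact pvMainPos graph n hn
  · exact pvMainNonpos graph n (by omega)
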